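-- pv_equiv track=rewrite | github.com/ankitpro/agent-corex | agent_core/input_abstraction/classifier.py | _display_name_from_param_name
-- ===== SOURCE A (Python) =====
-- def _display_name_from_param_name(param_name: str) -> str:
--     """Convert param_name to display_name.
--
--     Examples:
--         "workspacePath" → "Workspace Path"
--         "project_id" → "Project Id"
--         "query" → "Query"
--     """
--     # Handle camelCase: insert space before uppercase letters
--     result = ""
--     for i, c in enumerate(param_name):
--         if i > 0 and c.isupper() and param_name[i - 1].islower():
--             result += " "
--         result += c
--
--     # Handle snake_case: replace underscores with spaces
--     result = result.replace("_", " ")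
--
--     # Capitalize each word
--     return " ".join(word.capitalize() for word in result.split())
-- ===== SOURCE B (Python) =====
-- def _display_name_from_param_name(param_name: str) -> str:
--     """Single pass: collect words directly, then capitalize and join."""
--     words = []
--     buf = ""
--     prev = None
--     for c in param_name:
--         if c == "_" or c.isspace():
--             if buf:
--                 words.append(buf)
--             buf = ""
--         elif buf and c.isupper() and prev is not None and prev.islower():
--             words.append(buf)
--             buf = c
--         else:
--             buf += c
--         prev = c
--     if buf:
--         words.append(buf)
--     return " ".join(w.capitalize() for w in words)
-- ===== Notes on version B (the rewrite author's own statement) =====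
-- stated objective: simpler
-- what changed: Replaces A's four-pass pipeline (index-based fold inserting spaces at camelCase breaks, then underscore-to-space replacement, then whitespace split, then capitalize-and-join) by a single left-to-right pass that maintains a current-word buffer and collects the finished words directly, capitalizing and joining them at the end.
import Mathlib
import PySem

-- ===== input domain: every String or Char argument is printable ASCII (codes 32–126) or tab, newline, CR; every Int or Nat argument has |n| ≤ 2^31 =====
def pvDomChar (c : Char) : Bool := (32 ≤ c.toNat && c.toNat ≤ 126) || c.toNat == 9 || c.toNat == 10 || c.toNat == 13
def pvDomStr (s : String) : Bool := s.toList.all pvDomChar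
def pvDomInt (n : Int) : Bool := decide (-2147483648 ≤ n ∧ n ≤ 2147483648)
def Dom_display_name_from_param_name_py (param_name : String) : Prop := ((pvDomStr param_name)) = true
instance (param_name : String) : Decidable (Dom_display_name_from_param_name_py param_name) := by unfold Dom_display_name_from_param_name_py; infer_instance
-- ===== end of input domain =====

-- B replaces A's multi-pass pipeline (insert-space fold, replace, split, capitalize-join)
-- by one left-to-right pass that collects the words directly; objective: simpler.

-- str.capitalize(): first char upper-cased, rest lower-cased (exact on the ASCII domain)
def pvCapitalize (w : List Char) : List Char :=
  match w with
  | [] => []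
  | c :: rest => PySem.Chars.upperChar c :: rest.map PySem.Chars.lowerChar

-- ===== PORT A =====
-- param_name[i-1] is read only when i > 0, hence always in range; `.getD false` is unreachable
def display_name_from_param_name_py (param_name : String) : String :=
  String.ofList (PySem.Chars.join [' '] ((PySem.Chars.split₀
    (PySem.Chars.replace
      ((PySem.List.enumerate param_name.toList).foldl (fun (r : List Char) ic =>
        (if ic.1 > 0 && PySem.Chars.isupper ic.2 &&
            (((PySem.List.pyGet? param_name.toList (ic.1 - 1)).map PySem.Chars.islower).getD false)
         then r ++ [' '] else r) ++ [ic.2]) [])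
      ['_'] [' '])).map pvCapitalize))

-- ===== PORT B =====
-- B's single pass: (words, buf, prev) state, flushing buf on separators and camelCase breaks
def pvBLoop (words : List (List Char)) (buf : List Char) (prev : Option Char) :
    List Char → List (List Char)
  | [] => if buf.isEmpty then words else words ++ [buf]
  | c :: cs =>
    if c = '_' || PySem.Chars.isspace c then
      pvBLoop (if buf.isEmpty then words else words ++ [buf]) [] (some c) cs
    else if !buf.isEmpty && PySem.Chars.isupper c &&
            (prev.map PySem.Chars.islower).getD false then
      pvBLoop (words ++ [buf]) [c] (some c) cs
    else
      pvBLoop words (buf ++ [c]) (some c) cs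

def display_name_from_param_name_py_alt (param_name : String) : String :=
  String.ofList (PySem.Chars.join [' ']
    ((pvBLoop [] [] none param_name.toList).map pvCapitalize))

-- ===== PRECONDITION & SPEC =====
def Spec_display_name_from_param_name_py (param_name : String) (out : String) : Prop := out = display_name_from_param_name_py_alt param_name
instance (param_name : String) (out : String) : Decidable (Spec_display_name_from_param_name_py param_name out) := by unfold Spec_display_name_from_param_name_py; infer_instance

-- ===== CLAIM (what is proved, stated in full; the proofs are below) =====
def Claim_equal_display_name_from_param_name_py : Prop := ∀ (param_name : String), Dom_display_name_from_param_name_py param_name → Spec_display_name_from_param_name_py param_name (display_name_from_param_name_py param_name)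

-- ===== LEMMAS AND PROOFS =====

-- the camelCase word-break test, with `none` for "no previous character"
def pvBoundary (prev : Option Char) (c : Char) : Bool :=
  PySem.Chars.isupper c && (prev.map PySem.Chars.islower).getD false

-- the character-wise effect of result.replace("_", " ")
def pvSub (c : Char) : Char := if c = '_' then ' ' else c

-- A's first pass as a structural recursion: original chars with ' ' inserted at breaks
def pvInsSp (prev : Option Char) : List Char → List Char
  | [] => []
  | c :: cs => (if pvBoundary prev c then [' '] else []) ++ c :: pvInsSp (some c) cs

-- split₀ rephrased front-to-back with an explicit current-word buffer
def pvSplitAcc (words : List (List Char)) (buf : List Char) : List Char → List (List Char)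
  | [] => if buf.isEmpty then words else words ++ [buf]
  | c :: cs =>
    if PySem.Chars.isspace c then
      pvSplitAcc (if buf.isEmpty then words else words ++ [buf]) [] cs
    else
      pvSplitAcc words (buf ++ [c]) cs

lemma pv_isspace_not_isupper (c : Char) (h : PySem.Chars.isspace c = true) :
    PySem.Chars.isupper c = false := by
  by_contra hne
  have hu : PySem.Chars.isupper c = true := by
    cases hx : PySem.Chars.isupper c
    · exact absurd hx hne
    · rfl
  simp only [PySem.Chars.isupper, Bool.and_eq_true, decide_eq_true_eq] at hu
  have h1 : ('A').toNat ≤ c.toNat := Fin.mk_le_mk.mp hu.1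
  have h2 : c.toNat ≤ ('Z').toNat := Fin.mk_le_mk.mp hu.2
  have hA : ('A').toNat = 65 := rfl
  have hZ : ('Z').toNat = 90 := rfl
  simp only [PySem.Chars.isspace, Bool.or_eq_true, Bool.and_eq_true, decide_eq_true_eq] at h
  omega

lemma pvFoldA (cs : List Char) :
    ∀ (suf pre r : List Char), cs = pre ++ suf →
    (PySem.List.enumerate suf (pre.length : Int)).foldl (fun (r : List Char) ic =>
        (if ic.1 > 0 && PySem.Chars.isupper ic.2 &&
            (((PySem.List.pyGet? cs (ic.1 - 1)).map PySem.Chars.islower).getD false)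
         then r ++ [' '] else r) ++ [ic.2]) r
      = r ++ pvInsSp pre.getLast? suf := by
  intro suf
  induction suf with
  | nil => intro pre r h; simp [PySem.List.enumerate_nil, pvInsSp]
  | cons c cs' ih =>
    intro pre r h
    rw [PySem.List.enumerate_cons, List.foldl_cons]
    have hstep : ((pre.length : Int) + 1) = (((pre ++ [c]).length : Nat) : Int) := by
      simp
    have hcond : ((pre.length : Int) > 0 && PySem.Chars.isupper c &&
        (((PySem.List.pyGet? cs ((pre.length : Int) - 1)).map PySem.Chars.islower).getD false))
        = pvBoundary pre.getLast? c := by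
      cases pre with
      | nil => simp [pvBoundary]
      | cons p ps =>
        have hlen : ((((p :: ps).length : Nat) : Int) - 1) = (((ps.length : Nat)) : Int) := by
          simp
        have hget : PySem.List.pyGet? cs ((ps.length : Nat) : Int)
            = some ((p :: ps).getLast (by simp)) := by
          rw [PySem.List.pyGet?_natCast, h,
            List.getElem?_append_left (by simp),
            List.getElem?_eq_getElem (by simp)]
          rw [List.getLast_eq_getElem]
          simp only [List.length_cons, Nat.add_sub_cancel]
          rfl
        rw [hlen, hget]
        rw [List.getLast?_eq_some_getLast (l := p :: ps) (by simp)]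
        simp only [pvBoundary, Option.map_some, Option.getD_some]
        cases PySem.Chars.isupper c <;> simp [Bool.and_comm]
    rw [hcond]
    rw [hstep, ih (pre ++ [c]) _ (by simp [h])]
    cases hb : pvBoundary pre.getLast? c <;>
      simp [pvInsSp, hb, List.getLast?_append]

lemma pvReplaceGo : ∀ (fuel : Nat) (l acc : List Char), l.length ≤ fuel →
    PySem.Chars.replace.go ['_'] [' '] fuel l acc = acc.reverse ++ l.map pvSub := by
  intro fuel
  induction fuel with
  | zero =>
    intro l acc h
    have : l = [] := by cases l <;> simp_all
    subst this; simp [PySem.Chars.replace.go]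
  | succ n ih =>
    intro l acc h
    cases l with
    | nil => simp [PySem.Chars.replace.go]
    | cons c t =>
      simp only [PySem.Chars.replace.go]
      by_cases hc : c = '_'
      · subst hc
        rw [if_pos (by simp [List.isPrefixOf])]
        rw [ih _ _ (by simpa using Nat.le_of_succ_le_succ h)]
        simp [pvSub]
      · rw [if_neg (by simp [List.isPrefixOf]; exact fun hh => hc hh.symm)]
        rw [ih _ _ (by simpa using Nat.le_of_succ_le_succ h)]
        simp [pvSub, hc]

lemma pvReplace (l : List Char) :
    PySem.Chars.replace l ['_'] [' '] = l.map pvSub := by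
  simp only [PySem.Chars.replace, List.isEmpty_cons]
  exact pvReplaceGo l.length l [] le_rfl

lemma pvSplitGo : ∀ (l cur : List Char) (acc : List (List Char)),
    PySem.Chars.split₀.go l cur acc = pvSplitAcc acc.reverse cur.reverse l := by
  intro l
  induction l with
  | nil =>
    intro cur acc
    simp only [PySem.Chars.split₀.go, pvSplitAcc]
    cases hc : cur.isEmpty <;> simp_all
  | cons c cs ih =>
    intro cur acc
    simp only [PySem.Chars.split₀.go, pvSplitAcc]
    by_cases hs : PySem.Chars.isspace c = true
    · rw [if_pos hs, if_pos hs]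
      cases hc : cur.isEmpty
      · rw [if_neg (by simp), if_neg (by simp_all)]
        rw [ih]
        simp
      · rw [if_pos (by simp), if_pos (by simp_all)]
        rw [ih]
        simp
    · rw [if_neg hs, if_neg hs, ih]
      simp

lemma pvBLoopSplit : ∀ (l : List Char) (prev : Option Char)
    (words : List (List Char)) (buf : List Char),
    pvSplitAcc words buf ((pvInsSp prev l).map pvSub) = pvBLoop words buf prev l := by
  intro l
  induction l with
  | nil => intro prev words buf; simp [pvInsSp, pvSplitAcc, pvBLoop]
  | cons c cs ih =>
    intro prev words buf
    simp only [pvBLoop]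
    by_cases hsep : (c = '_' || PySem.Chars.isspace c) = true
    · rw [if_pos hsep]
      -- a separator is never a camelCase boundary, and pvSub c is a space
      have hnb : pvBoundary prev c = false := by
        rcases Bool.or_eq_true _ _ |>.mp hsep with h | h
        · have hc' : c = '_' := by simpa using h
          subst hc'
          simp [pvBoundary, show PySem.Chars.isupper '_' = false from by decide]
        · simp [pvBoundary, pv_isspace_not_isupper c h]
      have hsp : PySem.Chars.isspace (pvSub c) = true := by
        rcases Bool.or_eq_true _ _ |>.mp hsep with h | h
        · have hc' : c = '_' := by simpa using h
          subst hc'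
          simp only [pvSub]
          decide
        · have hc' : c ≠ '_' := by rintro rfl; revert h; decide
          simpa [pvSub, hc'] using h
      have hstream : (pvInsSp prev (c :: cs)).map pvSub
          = pvSub c :: (pvInsSp (some c) cs).map pvSub := by
        simp [pvInsSp, hnb]
      rw [hstream]
      simp only [pvSplitAcc, if_pos hsp]
      exact ih (some c) _ []
    · rw [if_neg hsep]
      have hc : c ≠ '_' := by intro h; exact hsep (by simp [h])
      have hns : PySem.Chars.isspace c = false := by
        cases h : PySem.Chars.isspace c
        · rfl
        · exact absurd (by simp [h]) hsep
      have hsub : pvSub c = c := by simp [pvSub, hc]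
      cases hb : pvBoundary prev c
      · -- no camelCase break: the character simply extends the current word
        have hstream : (pvInsSp prev (c :: cs)).map pvSub
            = c :: (pvInsSp (some c) cs).map pvSub := by
          simp [pvInsSp, hb, hsub]
        have hbr : (!buf.isEmpty && PySem.Chars.isupper c &&
            (prev.map PySem.Chars.islower).getD false) = false := by
          simp only [pvBoundary] at hb
          cases hu : PySem.Chars.isupper c <;>
            cases hl : (prev.map PySem.Chars.islower).getD false <;> simp_all
        rw [hstream, if_neg (show ¬(!buf.isEmpty && PySem.Chars.isupper c &&
          (prev.map PySem.Chars.islower).getD false) = true by simp [hbr])]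
        simp only [pvSplitAcc, if_neg (show ¬PySem.Chars.isspace c = true by simp [hns])]
        exact ih (some c) _ _
      · -- camelCase break: A inserted a space, B flushes (possibly empty) buf
        have hstream : (pvInsSp prev (c :: cs)).map pvSub
            = ' ' :: c :: (pvInsSp (some c) cs).map pvSub := by
          simp [pvInsSp, hb, hsub]
          decide
        simp only [pvBoundary, Bool.and_eq_true] at hb
        rw [hstream]
        by_cases hbe : buf.isEmpty = true
        · have hbuf : buf = [] := List.isEmpty_iff.mp hbe
          subst hbuf
          rw [if_neg (show ¬(!(List.isEmpty ([] : List Char)) && PySem.Chars.isupper c &&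
            (prev.map PySem.Chars.islower).getD false) = true by simp)]
          simp only [pvSplitAcc,
            if_pos (show PySem.Chars.isspace ' ' = true from by decide),
            if_pos (show (List.isEmpty ([] : List Char)) = true from rfl),
            if_neg (show ¬PySem.Chars.isspace c = true by simp [hns]), List.nil_append]
          exact ih (some c) _ _
        · have hbe' : buf.isEmpty = false := by
            cases h : buf.isEmpty
            · rfl
            · exact absurd h hbe
          rw [if_pos (show (!buf.isEmpty && PySem.Chars.isupper c &&
            (prev.map PySem.Chars.islower).getD false) = true by simp [hbe', hb.1, hb.2])]
          simp only [pvSplitAcc,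
            if_pos (show PySem.Chars.isspace ' ' = true from by decide),
            if_neg (show ¬buf.isEmpty = true by simp [hbe']),
            if_neg (show ¬PySem.Chars.isspace c = true by simp [hns]), List.nil_append]
          exact ih (some c) _ [c]

-- ===== VERDICT (by name: the statement is the Claim_ definition above) =====
theorem display_name_from_param_name_py_spec : Claim_equal_display_name_from_param_name_py := by
  intro param_name _
  unfold Spec_display_name_from_param_name_py
  unfold display_name_from_param_name_py display_name_from_param_name_py_alt
  have h1 := pvFoldA param_name.toList param_name.toList [] [] (by simp)
  simp only [List.length_nil, Nat.cast_zero, List.getLast?_nil, List.nil_append] at h1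
  rw [h1, pvReplace]
  have h2 : PySem.Chars.split₀ ((pvInsSp none param_name.toList).map pvSub)
      = pvBLoop [] [] none param_name.toList := by
    rw [show PySem.Chars.split₀ ((pvInsSp none param_name.toList).map pvSub)
        = PySem.Chars.split₀.go ((pvInsSp none param_name.toList).map pvSub) [] [] from rfl]
    rw [pvSplitGo]
    exact pvBLoopSplit param_name.toList none [] []
  rw [h2]
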